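-- pv_equiv track=rewrite | github.com/JackieMaw/AdventOfCode | python/2023/2023day13a.py | is_row_fold_at
-- ===== SOURCE A (Python) =====
-- def is_row_fold_at(row_fold, chunk):
--
--     for offset in range(1, row_fold + 1): # this boundary is wrong
--         row_before = row_fold - offset
--         row_after = row_fold - 1 + offset
--         if row_before >= 0 and row_after < len(chunk):
--             if chunk[row_before] != chunk[row_after]:
--                 return False
--
--     return True
-- ===== SOURCE B (Python) =====
-- def is_row_fold_at(row_fold, chunk):
--     if row_fold <= 0:
--         return True
--     m = min(row_fold, len(chunk) - row_fold)
--     if m <= 0: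
--         return True
--     return _palindrome(chunk[row_fold - m : row_fold + m])
--
-- def _palindrome(xs):
--     if len(xs) <= 1:
--         return True
--     return xs[0] == xs[-1] and _palindrome(xs[1:-1])
-- ===== Notes on version B (the rewrite author's own statement) =====
-- stated objective: alternative
-- what changed: Instead of scanning offsets with per-offset bounds guards, B first extracts the symmetric window of rows around the fold (min(row_fold, n - row_fold) on each side) and then checks that window is a palindrome by structural recursion peeling the first and last row off each step.
import Mathlib
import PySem

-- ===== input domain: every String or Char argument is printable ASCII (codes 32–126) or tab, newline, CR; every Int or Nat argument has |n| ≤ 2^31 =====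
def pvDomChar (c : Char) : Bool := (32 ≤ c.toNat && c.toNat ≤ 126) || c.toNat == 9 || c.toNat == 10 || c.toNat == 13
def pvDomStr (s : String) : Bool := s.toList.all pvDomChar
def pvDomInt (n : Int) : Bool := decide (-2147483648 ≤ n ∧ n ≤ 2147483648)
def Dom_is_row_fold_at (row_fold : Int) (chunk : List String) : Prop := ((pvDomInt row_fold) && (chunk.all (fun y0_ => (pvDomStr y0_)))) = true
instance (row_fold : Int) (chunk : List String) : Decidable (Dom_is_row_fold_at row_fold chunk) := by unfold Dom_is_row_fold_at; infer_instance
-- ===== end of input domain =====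

-- B extracts the symmetric window of rows around the fold and checks it is a palindrome by
-- structural recursion peeling both ends, instead of A's offset loop with bounds guards; objective: alternative.

-- ===== PORT A =====
-- A's for-loop over range(1, row_fold+1) with early 'return False', as structural recursion.
def pvLoopA (row_fold : Int) (chunk : List String) : List Int → Bool
  | [] => true
  | offset :: rest =>
    let row_before := row_fold - offset
    let row_after := row_fold - 1 + offset
    if row_before ≥ 0 ∧ row_after < (chunk.length : Int) then
      if PySem.List.pyGet? chunk row_before ≠ PySem.List.pyGet? chunk row_after then
        false
      else
        pvLoopA row_fold chunk rest
    else
      pvLoopA row_fold chunk rest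

def is_row_fold_at (row_fold : Int) (chunk : List String) : Bool :=
  pvLoopA row_fold chunk (PySem.List.pyRange 1 (row_fold + 1) 1)

-- ===== PORT B =====
-- _palindrome: xs[0] == xs[-1] and recurse on xs[1:-1]
def pvPal (xs : List String) : Bool :=
  if h : xs.length ≤ 1 then true
  else
    (PySem.List.pyGet? xs 0 == PySem.List.pyGet? xs (-1)) &&
      pvPal (PySem.List.slice xs (some 1) (some (-1)))
termination_by xs.length
decreasing_by
  rw [PySem.List.length_slice]
  simp only [PySem.List.clampIdx_neg_one]
  have : PySem.List.clampIdx xs.length 1 = min 1 xs.length := by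
    have := PySem.List.clampIdx_natCast (n := xs.length) (k := 1)
    simpa using this
  omega

def is_row_fold_at_alt (row_fold : Int) (chunk : List String) : Bool :=
  if row_fold ≤ 0 then true
  else
    let m := min row_fold ((chunk.length : Int) - row_fold)
    if m ≤ 0 then true
    else pvPal (PySem.List.slice chunk (some (row_fold - m)) (some (row_fold + m)))

-- ===== PRECONDITION & SPEC =====
def Spec_is_row_fold_at (row_fold : Int) (chunk : List String) (out : Bool) : Prop := out = is_row_fold_at_alt row_fold chunk
instance (row_fold : Int) (chunk : List String) (out : Bool) : Decidable (Spec_is_row_fold_at row_fold chunk out) := by unfold Spec_is_row_fold_at; infer_instance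

-- ===== CLAIM (what is proved, stated in full; the proofs are below) =====
def Claim_equal_is_row_fold_at : Prop := ∀ (row_fold : Int) (chunk : List String), Dom_is_row_fold_at row_fold chunk → Spec_is_row_fold_at row_fold chunk (is_row_fold_at row_fold chunk)

-- ===== LEMMAS AND PROOFS =====

-- A's loop returns true iff every in-bounds offset compares equal rows.
lemma pvLoopA_eq_true_iff (row_fold : Int) (chunk : List String) (os : List Int) :
    pvLoopA row_fold chunk os = true ↔
      ∀ o ∈ os, 0 ≤ row_fold - o → row_fold - 1 + o < (chunk.length : Int) →
        PySem.List.pyGet? chunk (row_fold - o) = PySem.List.pyGet? chunk (row_fold - 1 + o) := by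
  induction os with
  | nil => simp [pvLoopA]
  | cons o rest ih =>
    simp only [pvLoopA, List.mem_cons]
    split_ifs with h1 h2
    · simp only [false_iff]
      push Not
      exact ⟨o, Or.inl rfl, h1.1, h1.2, h2⟩
    · push Not at h2
      rw [ih]
      constructor
      · rintro h o' (rfl | ho') ha hb
        · exact h2
        · exact h o' ho' ha hb
      · intro h o' ho' ha hb; exact h o' (Or.inr ho') ha hb
    · push Not at h1
      rw [ih]
      constructor
      · rintro h o' (rfl | ho') ha hb
        · exact absurd (h1 ha) (by omega)
        · exact h o' ho' ha hb
      · intro h o' ho' ha hb; exact h o' (Or.inr ho') ha hb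

-- index congruence for getElem
lemma pvGetCongr (xs : List String) {i j : Nat} (h : i = j) (hi : i < xs.length) (hj : j < xs.length) :
    xs[i] = xs[j] := by subst h; rfl

-- pyGet? at -1 is the last element
lemma pvGet_neg_one (xs : List String) (h : 1 ≤ xs.length) :
    PySem.List.pyGet? xs (-1) = xs[xs.length - 1]? := by
  simp [PySem.List.pyGet?, PySem.List.pyIdx?]
  rw [if_pos h]
  rfl

-- xs[1:-1] is drop 1 then take (len - 2)
lemma pvSliceMid (xs : List String) (h : 2 ≤ xs.length) :
    PySem.List.slice xs (some 1) (some (-1)) = (xs.drop 1).take (xs.length - 2) := by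
  have hne : xs ≠ [] := by intro e; simp [e] at h
  have hm : min 1 xs.length = 1 := by omega
  have e : ((xs.length : Int) + -1).toNat - 1 = xs.length - 2 := by omega
  simp [PySem.List.slice, PySem.List.clampIdx, hne, hm, e, List.drop_one]

-- pvPal is exactly the mirror-index palindrome predicate
lemma pvPal_iff (n : Nat) (xs : List String) (hn : xs.length = n) :
    pvPal xs = true ↔
      ∀ i : Nat, (h : i < xs.length) → xs[i] = xs[xs.length - 1 - i]'(by omega) := by
  induction n using Nat.strong_induction_on generalizing xs with
  | _ n ih =>
  rw [pvPal]
  split_ifs with h1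
  · simp only [true_iff]
    intro i hi
    have h0 : i = 0 := by omega
    have h0' : xs.length - 1 - i = 0 := by omega
    subst h0
    exact pvGetCongr xs h0'.symm (by omega) (by omega)
  · have hlen2 : 2 ≤ xs.length := by omega
    rw [pvSliceMid xs hlen2]
    set mid := (xs.drop 1).take (xs.length - 2) with hmiddef
    have hmidlen : mid.length = xs.length - 2 := by
      simp [hmiddef]; omega
    have hmidget : ∀ (i : Nat) (hi : i < mid.length),
        mid[i] = xs[1 + i]'(by omega) := by
      intro i hi
      simp [hmiddef, List.getElem_take]
      exact pvGetCongr xs (by omega) (by omega) (by omega)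
    have hget0 : PySem.List.pyGet? xs 0 = some (xs[0]'(by omega)) := by
      have := PySem.List.pyGet?_natCast (xs := xs) (n := 0)
      simpa using this.trans (List.getElem?_eq_getElem (by omega))
    have hgetl : PySem.List.pyGet? xs (-1) = some (xs[xs.length - 1]'(by omega)) := by
      rw [pvGet_neg_one xs (by omega)]
      exact List.getElem?_eq_getElem (by omega)
    rw [Bool.and_eq_true, ih (xs.length - 2) (by omega) mid hmidlen,
        hget0, hgetl, beq_iff_eq, Option.some_inj]
    constructor
    · rintro ⟨heq, hpal⟩ i hi
      by_cases hi0 : i = 0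
      · subst hi0
        simpa using heq
      · by_cases hil : i = xs.length - 1
        · subst hil
          rw [pvGetCongr xs (by omega : xs.length - 1 - (xs.length - 1) = 0) (by omega) (by omega)]
          exact heq.symm
        · have hi' : i - 1 < mid.length := by omega
          have := hpal (i - 1) hi'
          rw [hmidget _ hi', hmidget _ (by omega)] at this
          have e1 : 1 + (i - 1) = i := by omega
          have e2 : 1 + (mid.length - 1 - (i - 1)) = xs.length - 1 - i := by omega
          rw [pvGetCongr xs e1 (by omega) (by omega), pvGetCongr xs e2 (by omega) (by omega)] at this
          exact this
    · intro H
      refine ⟨?_, ?_⟩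
      · have := H 0 (by omega)
        simpa using this
      · intro j hj
        rw [hmidget _ hj, hmidget _ (by omega)]
        have := H (1 + j) (by omega)
        have e2 : xs.length - 1 - (1 + j) = 1 + (mid.length - 1 - j) := by omega
        rw [pvGetCongr xs e2 (by omega) (by omega)] at this
        exact this

-- ===== VERDICT (by name: the statement is the Claim_ definition above) =====
theorem is_row_fold_at_spec : Claim_equal_is_row_fold_at := by
  intro rf chunk _
  show is_row_fold_at rf chunk = is_row_fold_at_alt rf chunk
  rw [is_row_fold_at, is_row_fold_at_alt]
  by_cases hrf : rf ≤ 0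
  · rw [if_pos hrf, PySem.List.pyRange_one_eq_nil (by omega)]
    rfl
  · rw [if_neg hrf]
    show pvLoopA rf chunk (PySem.List.pyRange 1 (rf + 1) 1) =
      (if min rf ((chunk.length : Int) - rf) ≤ 0 then true
       else pvPal (PySem.List.slice chunk
         (some (rf - min rf ((chunk.length : Int) - rf)))
         (some (rf + min rf ((chunk.length : Int) - rf)))))
    set m : Int := min rf ((chunk.length : Int) - rf) with hm
    have hA : m ≤ rf := min_le_left _ _
    have hB : m ≤ (chunk.length : Int) - rf := min_le_right _ _
    have hD : m = rf ∨ m = (chunk.length : Int) - rf := min_choice _ _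
    clear_value m
    by_cases hm0 : m ≤ 0
    · rw [if_pos hm0, Bool.eq_iff_iff, pvLoopA_eq_true_iff]
      simp only [iff_true]
      intro o ho ha hb
      rw [PySem.List.mem_pyRange_one] at ho
      exact absurd hb (by omega)
    · rw [if_neg hm0]
      have hw : PySem.List.slice chunk (some (rf - m)) (some (rf + m)) =
          (chunk.drop (rf - m).toNat).take (2 * m.toNat) := by
        rw [PySem.List.slice_of_nonneg chunk (a := rf - m) (b := rf + m) (by omega) (by omega) (by omega) (by omega)]
        congr 1
        omega
      rw [hw]
      set a : Nat := (rf - m).toNat with ha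
      set mm : Nat := m.toNat with hmm
      set w := (chunk.drop a).take (2 * mm) with hwdef
      have han : a + 2 * mm ≤ chunk.length := by omega
      have hwlen : w.length = 2 * mm := by
        simp [hwdef]; omega
      have hwget : ∀ (i : Nat) (hi : i < w.length),
          w[i] = chunk[a + i]'(by omega) := by
        intro i hi
        simp [hwdef, List.getElem_take, List.getElem_drop]
      rw [Bool.eq_iff_iff, pvLoopA_eq_true_iff, pvPal_iff w.length w rfl]
      constructor
      · intro H
        have key : ∀ i : Nat, (hi : i < mm) →
            chunk[a + i]'(by omega) = chunk[a + (2 * mm - 1 - i)]'(by omega) := by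
          intro i hi
          have ho : (1:Int) ≤ (m - i) ∧ (m - i) ≤ rf := by omega
          have hx := H (m - (i:Int))
            (by rw [PySem.List.mem_pyRange_one]; omega) (by omega) (by omega)
          have e1 : rf - (m - (i:Int)) = ((a + i : Nat) : Int) := by omega
          have e2 : rf - 1 + (m - (i:Int)) = ((a + (2 * mm - 1 - i) : Nat) : Int) := by omega
          rw [e1, e2, PySem.List.pyGet?_natCast, PySem.List.pyGet?_natCast,
              List.getElem?_eq_getElem (by omega), List.getElem?_eq_getElem (by omega)] at hx
          exact Option.some.inj hx
        intro i hi
        rw [hwget _ hi, hwget _ (by omega)]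
        by_cases hcase : i < mm
        · have := key i hcase
          rw [pvGetCongr chunk (by omega : a + (2 * mm - 1 - i) = a + (w.length - 1 - i)) (by omega) (by omega)] at this
          exact this
        · have hi' : 2 * mm - 1 - i < mm := by omega
          have := (key (2 * mm - 1 - i) hi').symm
          rw [pvGetCongr chunk (by omega : a + (2 * mm - 1 - (2 * mm - 1 - i)) = a + i) (by omega) (by omega),
              pvGetCongr chunk (by omega : a + (2 * mm - 1 - i) = a + (w.length - 1 - i)) (by omega) (by omega)] at this
          exact this
      · intro H o ho hb1 hb2
        rw [PySem.List.mem_pyRange_one] at ho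
        have hom : o ≤ m := by omega
        have hiw : (m - o).toNat < w.length := by omega
        have hx := H (m - o).toNat hiw
        rw [hwget _ hiw, hwget _ (by omega)] at hx
        have e1 : rf - o = ((a + (m - o).toNat : Nat) : Int) := by omega
        have e2 : rf - 1 + o = ((a + (w.length - 1 - (m - o).toNat) : Nat) : Int) := by omega
        rw [e1, e2, PySem.List.pyGet?_natCast, PySem.List.pyGet?_natCast,
            List.getElem?_eq_getElem (by omega), List.getElem?_eq_getElem (by omega)]
        exact congrArg some hx
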